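-- pv_equiv track=rewrite | github.com/tomdif/causal-algebraic-geometry-lean | scripts/branching_constraints.py | young_diagram_dim_su_n
-- ===== SOURCE A (Python) =====
-- def young_diagram_dim_su_n(n, lam):
--     """
--     Dimension of SU(n) irrep with Young diagram lam = [lam_1, ..., lam_k].
--     Uses hook-content formula.
--     """
--     k = len(lam)
--     if k == 0:
--         return 1
--     # Pad to length n
--     lam_padded = list(lam) + [0] * (n - k) if k < n else list(lam[:n])
--
--     # Product of (n - i + lam_i - j) / hook(i,j)
--     num = 1
--     den = 1
--     for i in range(len(lam_padded)):
--         for j in range(lam_padded[i]):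
--             # Content factor: n - 1 - i + j
--             num *= (n - 1 - i + j + 1)  # = n - i + j
--             # Hook length
--             arm = lam_padded[i] - j - 1
--             leg = sum(1 for ii in range(i+1, len(lam_padded)) if lam_padded[ii] > j)
--             hook = arm + leg + 1
--             den *= hook
--     return num // den
-- ===== SOURCE B (Python) =====
-- def young_diagram_dim_su_n(n, lam):
--     """
--     Dimension of SU(n) irrep with Young diagram lam = [lam_1, ..., lam_k].
--     Hook-content formula, one pass: rows are scanned bottom-up while an array
--     conj[j] maintains the number of rows strictly below the current one whose
--     length exceeds j, so each leg length is a single array lookup.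
--     """
--     k = len(lam)
--     if k == 0:
--         return 1
--     rows = list(lam) + [0] * (n - k) if k < n else list(lam[:n])
--     maxr = 0
--     for r in rows:
--         if r > maxr:
--             maxr = r
--     conj = [0] * maxr
--     num = 1
--     den = 1
--     for i in range(len(rows) - 1, -1, -1):
--         r = rows[i]
--         for j in range(r):
--             num *= n - i + j          # content factor
--             den *= (r - j) + conj[j]  # hook = arm+1 + leg = (r-j) + conj[j]
--         for j in range(r):
--             conj[j] += 1
--     return num // den
-- ===== Notes on version B (the rewrite author's own statement) =====
-- stated objective: alternative
-- what changed: Replaces the per-cell leg scan over all lower rows by a bottom-up sweep that maintains conjugate-partition column counts in an array, so each hook length is a single lookup; fewer index operations, but running time is dominated by big-integer products in both versions.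
import Mathlib
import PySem

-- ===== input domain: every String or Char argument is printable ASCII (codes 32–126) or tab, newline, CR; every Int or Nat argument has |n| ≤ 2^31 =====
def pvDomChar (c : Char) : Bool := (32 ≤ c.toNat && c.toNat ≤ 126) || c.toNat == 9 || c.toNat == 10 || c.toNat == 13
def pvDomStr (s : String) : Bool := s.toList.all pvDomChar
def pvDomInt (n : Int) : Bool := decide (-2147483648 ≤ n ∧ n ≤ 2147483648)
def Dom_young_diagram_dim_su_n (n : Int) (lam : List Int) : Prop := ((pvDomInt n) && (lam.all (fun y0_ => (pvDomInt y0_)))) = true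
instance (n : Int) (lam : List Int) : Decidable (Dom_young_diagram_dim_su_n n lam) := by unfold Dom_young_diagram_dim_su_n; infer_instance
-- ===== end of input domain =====

-- B replaces A's per-cell leg scan over all lower rows by a bottom-up sweep that
-- maintains conjugate-partition column counts in an array (alternative algorithm).

-- ===== PORT A =====
-- leg = sum(1 for ii in range(i+1, len(lam_padded)) if lam_padded[ii] > j),
-- ported as a fold over the suffix of rows below row i (the rows at indices i+1..)
def pvLegA (tail : List Int) (j : Int) : Int :=
  tail.foldl (fun acc x => if x > j then acc + 1 else acc) 0

-- inner loop: for j in range(lam_padded[i]) with state (num, den)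
def pvRowA (n : Int) (i : Int) (r : Int) (rest : List Int) (p : Int × Int) : Int × Int :=
  (PySem.List.pyRange 0 r 1).foldl
    (fun p j =>
      let arm := r - j - 1
      let leg := pvLegA rest j
      let hook := arm + leg + 1
      (p.1 * (n - 1 - i + j + 1), p.2 * hook)) p

-- outer loop: for i in range(len(lam_padded)), recursion over the rows carrying index i
def pvCellsA (n : Int) (i : Int) (rows : List Int) (p : Int × Int) : Int × Int :=
  match rows with
  | [] => p
  | r :: rest => pvCellsA n (i + 1) rest (pvRowA n i r rest p)

def young_diagram_dim_su_n (n : Int) (lam : List Int) : Int :=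
  let k : Int := lam.length
  if k == 0 then 1
  else
    let lam_padded := if k < n then lam ++ List.replicate (n - k).toNat 0
                      else PySem.List.slice lam none (some n)
    let p := pvCellsA n 0 lam_padded (1, 1)
    PySem.Int.floordiv p.1 p.2

-- ===== PORT B =====
-- for j in range(r): conj[j] += 1  (the Python list conj is used as a mutable
-- fixed-size array, so it is ported as Array Int; indices are always in range)
def pvIncrB (conj : Array Int) (r : Int) : Array Int :=
  (PySem.List.pyRange 0 r 1).foldl
    (fun cb j => cb.setIfInBounds j.toNat (cb.getD j.toNat 0 + 1)) conj

-- for j in range(r): num *= n - i + j; den *= (r - j) + conj[j]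
def pvRowB (n : Int) (conj : Array Int) (i : Int) (r : Int) (p : Int × Int) : Int × Int :=
  (PySem.List.pyRange 0 r 1).foldl
    (fun p j => (p.1 * (n - i + j), p.2 * ((r - j) + conj.getD j.toNat 0))) p

-- body of: for i, r in reversed(list(enumerate(rows)))
def pvStepB (n : Int) (st : Array Int × Int × Int) (ir : Int × Int) : Array Int × Int × Int :=
  let p := pvRowB n st.1 ir.1 ir.2 (st.2.1, st.2.2)
  (pvIncrB st.1 ir.2, p.1, p.2)

def young_diagram_dim_su_n_alt (n : Int) (lam : List Int) : Int :=
  let k : Int := lam.length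
  if k == 0 then 1
  else
    let rowsL := if k < n then lam ++ List.replicate (n - k).toNat 0
                 else PySem.List.slice lam none (some n)
    -- the Python list rows is accessed by index rows[i]; ported as an Array
    let rows := rowsL.toArray
    let maxr := rowsL.foldl (fun m r => if r > m then r else m) 0
    -- for i in range(len(rows) - 1, -1, -1)
    let st := (PySem.List.pyRange (PySem.List.len rowsL - 1) (-1) (-1)).foldl
        (fun st i => pvStepB n st (i, rows.getD i.toNat 0))
        (Array.replicate maxr.toNat 0, 1, 1)
    PySem.Int.floordiv st.2.1 st.2.2

-- ===== PRECONDITION & SPEC =====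
def Spec_young_diagram_dim_su_n (n : Int) (lam : List Int) (out : Int) : Prop := out = young_diagram_dim_su_n_alt n lam
instance (n : Int) (lam : List Int) (out : Int) : Decidable (Spec_young_diagram_dim_su_n n lam out) := by unfold Spec_young_diagram_dim_su_n; infer_instance

-- ===== CLAIM (what is proved, stated in full; the proofs are below) =====
def Claim_equal_young_diagram_dim_su_n : Prop := ∀ (n : Int) (lam : List Int), Dom_young_diagram_dim_su_n n lam → Spec_young_diagram_dim_su_n n lam (young_diagram_dim_su_n n lam)

-- ===== LEMMAS AND PROOFS =====

-- number of entries of l strictly greater than j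
def pvCgt (l : List Int) (j : Int) : Int := (l.countP (fun x => decide (j < x)) : Int)

def pvRowNumP (n i r : Int) : Int := ((PySem.List.pyRange 0 r 1).map (fun j => n - i + j)).prod
def pvRowDenP (rest : List Int) (r : Int) : Int :=
  ((PySem.List.pyRange 0 r 1).map (fun j => (r - j) + pvCgt rest j)).prod

def pvNProd (n i : Int) : List Int → Int
  | [] => 1
  | r :: rest => pvRowNumP n i r * pvNProd n (i + 1) rest

def pvDProd : List Int → Int
  | [] => 1
  | r :: rest => pvRowDenP rest r * pvDProd rest

theorem pv_foldl_pair (l : List Int) (f g : Int → Int) (a b : Int) :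
    l.foldl (fun p j => (p.1 * f j, p.2 * g j)) (a, b)
      = (a * (l.map f).prod, b * (l.map g).prod) := by
  induction l generalizing a b with
  | nil => simp
  | cons x xs ih => simp [List.foldl_cons, ih, mul_assoc]

theorem pvLegA_eq (l : List Int) (j : Int) : pvLegA l j = pvCgt l j := by
  suffices h : ∀ a : Int, l.foldl (fun acc x => if x > j then acc + 1 else acc) a = a + pvCgt l j by
    simpa [pvLegA] using h 0
  induction l with
  | nil => intro a; simp [pvCgt]
  | cons x xs ih =>
    intro a
    simp only [List.foldl_cons, ih, pvCgt, List.countP_cons]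
    by_cases h : j < x <;> simp [h, gt_iff_lt] <;> omega

theorem pvCellsA_eq (n : Int) (rows : List Int) : ∀ (i : Int) (p : Int × Int),
    pvCellsA n i rows p = (p.1 * pvNProd n i rows, p.2 * pvDProd rows) := by
  induction rows with
  | nil => intro i p; simp [pvCellsA, pvNProd, pvDProd]
  | cons r rest ih =>
    intro i p
    obtain ⟨a, b⟩ := p
    simp only [pvCellsA, ih, pvRowA, pvNProd, pvDProd]
    rw [pv_foldl_pair]
    have hnum : ((PySem.List.pyRange 0 r 1).map (fun j => n - 1 - i + j + 1)).prod
        = pvRowNumP n i r := by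
      unfold pvRowNumP
      congr 1
      exact List.map_congr_left (fun j _ => by ring)
    have hden : ((PySem.List.pyRange 0 r 1).map (fun j => r - j - 1 + pvLegA rest j + 1)).prod
        = pvRowDenP rest r := by
      unfold pvRowDenP
      congr 1
      exact List.map_congr_left (fun j _ => by rw [pvLegA_eq]; ring)
    rw [hnum, hden]
    simp only [Prod.mk.injEq]
    constructor <;> ring

theorem pv_agetD_set (c : Array Int) (i j : Nat) (v : Int) (hi : i < c.size) :
    (c.setIfInBounds i v).getD j 0 = if j = i then v else c.getD j 0 := by
  simp only [Array.getD_eq_getD_getElem?, Array.getElem?_setIfInBounds]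
  by_cases h : i = j
  · subst h; simp [hi]
  · rw [if_neg h, if_neg (fun hh => h hh.symm)]

theorem pvIncrAux (k : Nat) : ∀ (a r : Int) (c : Array Int), 0 ≤ a → r ≤ (c.size : Int) →
    (r - a).toNat = k →
    ((PySem.List.pyRange a r 1).foldl
        (fun cb j => cb.setIfInBounds j.toNat (cb.getD j.toNat 0 + 1)) c).size = c.size ∧
    ∀ j : Int, 0 ≤ j →
      ((PySem.List.pyRange a r 1).foldl
          (fun cb j => cb.setIfInBounds j.toNat (cb.getD j.toNat 0 + 1)) c).getD j.toNat 0
        = c.getD j.toNat 0 + (if a ≤ j ∧ j < r then 1 else 0) := by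
  induction k with
  | zero =>
    intro a r c ha hr hk
    have hra : r ≤ a := by omega
    rw [PySem.List.pyRange_one_eq_nil hra]
    refine ⟨rfl, fun j hj => ?_⟩
    simp only [List.foldl_nil]
    have : ¬ (a ≤ j ∧ j < r) := by omega
    simp [this]
  | succ k ih =>
    intro a r c ha hr hk
    have har : a < r := by omega
    rw [PySem.List.pyRange_one_cons har]
    simp only [List.foldl_cons]
    obtain ⟨hlen, hget⟩ := ih (a + 1) r (c.setIfInBounds a.toNat (c.getD a.toNat 0 + 1))
      (by omega) (by rw [Array.size_setIfInBounds]; exact hr) (by omega)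
    refine ⟨by rw [hlen, Array.size_setIfInBounds], fun j hj => ?_⟩
    have hlt : a.toNat < c.size := by omega
    rw [hget j hj, pv_agetD_set c a.toNat j.toNat _ hlt]
    by_cases hja : j.toNat = a.toNat
    · have h1 : ¬ (a + 1 ≤ j ∧ j < r) := by omega
      have h2 : a ≤ j ∧ j < r := by omega
      have hgd : c.getD j.toNat 0 = c.getD a.toNat 0 := by rw [hja]
      rw [if_pos hja, if_neg h1, if_pos h2, hgd]
      ring
    · have hiff : (a + 1 ≤ j ∧ j < r) ↔ (a ≤ j ∧ j < r) := by omega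
      rw [if_neg hja, if_congr hiff rfl rfl]

theorem pvIncrB_spec (r : Int) (c : Array Int) (hr : r ≤ (c.size : Int)) :
    (pvIncrB c r).size = c.size ∧
    ∀ j : Int, 0 ≤ j → (pvIncrB c r).getD j.toNat 0
      = c.getD j.toNat 0 + (if j < r then 1 else 0) := by
  obtain ⟨h1, h2⟩ := pvIncrAux (r - 0).toNat 0 r c le_rfl hr rfl
  refine ⟨h1, fun j hj => ?_⟩
  rw [pvIncrB, h2 j hj]
  congr 1
  by_cases h : j < r <;> simp [h, hj]

theorem pvCgt_cons (x : Int) (l : List Int) (j : Int) :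
    pvCgt (x :: l) j = pvCgt l j + (if j < x then 1 else 0) := by
  simp only [pvCgt, List.countP_cons]
  by_cases h : j < x <;> simp [h]

theorem pvLoopB_spec (n : Int) (rows : Array Int) : ∀ (k : Nat) (i0 : Int) (c : Array Int) (a b : Int),
    0 ≤ i0 → i0 + (k : Int) = (rows.size : Int) →
    (∀ x ∈ rows.toList, x ≤ (c.size : Int)) →
    (∀ j : Int, 0 ≤ j → c.getD j.toNat 0 = 0) →
    ∃ c', (PySem.List.pyRange i0 (rows.size : Int) 1).foldr
            (fun i st => pvStepB n st (i, rows.getD i.toNat 0)) (c, a, b)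
          = (c', a * pvNProd n i0 (rows.toList.drop i0.toNat),
                 b * pvDProd (rows.toList.drop i0.toNat))
        ∧ c'.size = c.size
        ∧ (∀ j : Int, 0 ≤ j → c'.getD j.toNat 0 = pvCgt (rows.toList.drop i0.toNat) j) := by
  intro k
  induction k with
  | zero =>
    intro i0 c a b h0 hsz hlen hzero
    have hnil : PySem.List.pyRange i0 (rows.size : Int) 1 = [] :=
      PySem.List.pyRange_one_eq_nil (by omega)
    have hdrop : rows.toList.drop i0.toNat = [] := by
      apply List.drop_eq_nil_of_le
      simp only [Array.length_toList]
      omega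
    rw [hnil, hdrop]
    exact ⟨c, by simp [pvNProd, pvDProd], rfl, fun j hj => by simp [hzero j hj, pvCgt]⟩
  | succ k ih =>
    intro i0 c a b h0 hsz hlen hzero
    have h1 : i0 < (rows.size : Int) := by omega
    rw [PySem.List.pyRange_one_cons h1, List.foldr_cons]
    obtain ⟨c', heq, hclen, hcget⟩ := ih (i0 + 1) c a b (by omega) (by omega) hlen hzero
    rw [heq]
    have hidx : i0.toNat < rows.toList.length := by
      simp only [Array.length_toList]; omega
    have hdrop : rows.toList.drop i0.toNat
        = rows.toList[i0.toNat] :: rows.toList.drop (i0.toNat + 1) :=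
      List.drop_eq_getElem_cons hidx
    have hr : rows.getD i0.toNat 0 = rows.toList[i0.toNat] := by
      rw [Array.getD_eq_getD_getElem?, ← Array.getElem?_toList,
          List.getElem?_eq_getElem hidx]
      rfl
    have h1n : (i0 + 1).toNat = i0.toNat + 1 := by omega
    have hrmem : rows.toList[i0.toNat] ∈ rows.toList := List.getElem_mem hidx
    have hrlen : rows.getD i0.toNat 0 ≤ (c'.size : Int) := by
      rw [hclen, hr]; exact hlen _ hrmem
    obtain ⟨hilen, higet⟩ := pvIncrB_spec (rows.getD i0.toNat 0) c' hrlen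
    refine ⟨pvIncrB c' (rows.getD i0.toNat 0), ?_, by rw [hilen, hclen], fun j hj => ?_⟩
    · simp only [pvStepB, pvRowB]
      rw [pv_foldl_pair]
      have hden : ((PySem.List.pyRange 0 (rows.getD i0.toNat 0) 1).map
            (fun j => rows.getD i0.toNat 0 - j + c'.getD j.toNat 0)).prod
          = pvRowDenP (rows.toList.drop (i0.toNat + 1)) (rows.getD i0.toNat 0) := by
        unfold pvRowDenP
        congr 1
        refine List.map_congr_left (fun j hjmem => ?_)
        have hj0 : 0 ≤ j := (PySem.List.mem_pyRange_one.mp hjmem).1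
        rw [hcget j hj0, h1n]
      rw [hden, hdrop]
      simp only [pvNProd, pvDProd, pvRowNumP, Prod.mk.injEq, hr, h1n]
      exact ⟨trivial, by ring, by ring⟩
    · rw [higet j hj, hcget j hj, hdrop, pvCgt_cons, h1n, hr]

theorem pv_foldl_max_le (l : List Int) : ∀ (m0 : Int),
    m0 ≤ l.foldl (fun m r => if r > m then r else m) m0 ∧
    ∀ x ∈ l, x ≤ l.foldl (fun m r => if r > m then r else m) m0 := by
  induction l with
  | nil => intro m0; simp
  | cons y ys ih =>
    intro m0
    simp only [List.foldl_cons, List.mem_cons]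
    obtain ⟨h1, h2⟩ := ih (if y > m0 then y else m0)
    have hm0 : m0 ≤ (if y > m0 then y else m0) := by split <;> omega
    have hy : y ≤ (if y > m0 then y else m0) := by split <;> omega
    refine ⟨le_trans hm0 h1, fun x hx => ?_⟩
    rcases hx with h | h
    · subst h; exact le_trans hy h1
    · exact h2 x h

-- ===== VERDICT (by name: the statement is the Claim_ definition above) =====
theorem young_diagram_dim_su_n_spec : Claim_equal_young_diagram_dim_su_n := by
  intro n lam _
  unfold Spec_young_diagram_dim_su_n young_diagram_dim_su_n young_diagram_dim_su_n_alt
  by_cases hk : ((lam.length : Int) == 0) = true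
  · simp only [hk, if_pos]
  · simp only [hk, Bool.false_eq_true, if_neg, not_false_iff]
    set rowsL := if ((lam.length : Int) < n) then lam ++ List.replicate (n - (lam.length : Int)).toNat 0
                 else PySem.List.slice lam none (some n) with hrowsL
    set maxr := rowsL.foldl (fun m r => if r > m then r else m) 0 with hmaxr
    have hmax := pv_foldl_max_le rowsL 0
    have hmnn : 0 ≤ maxr := hmax.1
    have hlen : ∀ x ∈ rowsL.toArray.toList, x ≤ ((Array.replicate maxr.toNat (0 : Int)).size : Int) := by
      intro x hx
      rw [List.toList_toArray] at hx
      have := hmax.2 x hx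
      simp only [Array.size_replicate]
      omega
    have hzero : ∀ j : Int, 0 ≤ j → (Array.replicate maxr.toNat (0 : Int)).getD j.toNat 0 = 0 := by
      intro j hj
      simp [Array.getD_eq_getD_getElem?, Array.getElem?_replicate]
      split <;> rfl
    have hrange : PySem.List.pyRange (PySem.List.len rowsL - 1) (-1) (-1)
        = (PySem.List.pyRange 0 (rowsL.toArray.size : Int) 1).reverse := by
      have hsz : PySem.List.len rowsL - 1 + 1 = (rowsL.toArray.size : Int) := by
        simp [PySem.List.len_eq, List.size_toArray]
      rw [PySem.List.pyRange_neg_one_eq_reverse,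
          show (-1 : Int) + 1 = 0 from by norm_num, hsz]
    rw [hrange, List.foldl_reverse]
    obtain ⟨c', heq, _, _⟩ := pvLoopB_spec n rowsL.toArray rowsL.toArray.size 0
      (Array.replicate maxr.toNat 0) 1 1 le_rfl (by omega) hlen hzero
    rw [Int.toNat_zero, List.drop_zero, List.toList_toArray] at heq
    rw [heq, pvCellsA_eq]
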